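-- pv_equiv track=rewrite | github.com/ArionDas/nlp_with_pytorch_from_scratch | 01_tokenization_embeddings/utils.py | merge_pair_in_words
-- ===== SOURCE A (Python) =====
-- def merge_pair_in_words(
--     word_freqs: dict[tuple[str, ...], int],
--     pair: tuple[str, str]
-- ) -> dict[tuple[str, ...], int]:
--     """
--     Merge all occurrences of a token pair in the vocabulary.
--
--     Args:
--         word_freqs: Dictionary of word tuples to frequencies
--         pair: The (token1, token2) pair to merge
--
--     Returns:
--         New word frequency dictionary with merged tokens
--     """
--     new_word_freqs = {}
--     merged = pair[0] + pair[1]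
--
--     for word, freq in word_freqs.items():
--         new_word = []
--         i = 0
--         while i < len(word):
--             if i < len(word) - 1 and word[i] == pair[0] and word[i + 1] == pair[1]:
--                 new_word.append(merged)
--                 i += 2
--             else:
--                 new_word.append(word[i])
--                 i += 1
--         new_word_freqs[tuple(new_word)] = freq
--
--     return new_word_freqs
-- ===== SOURCE B (Python) =====
-- def merge_pair_in_words(
--     word_freqs: dict[tuple[str, ...], int],
--     pair: tuple[str, str]
-- ) -> dict[tuple[str, ...], int]:
--     """Two-pass rewrite: first collect greedy non-overlapping match positions,
--     then rebuild each word from those positions."""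
--     merged = pair[0] + pair[1]
--     new_word_freqs = {}
--     for word, freq in word_freqs.items():
--         # pass 1: greedy non-overlapping match positions
--         positions = []
--         i = 0
--         while i < len(word) - 1:
--             if word[i] == pair[0] and word[i + 1] == pair[1]:
--                 positions.append(i)
--                 i += 2
--             else:
--                 i += 1
--         # pass 2: rebuild the word from the recorded positions
--         pos = set(positions)
--         result = []
--         j = 0
--         while j < len(word):
--             if j in pos:
--                 result.append(merged)
--                 j += 2
--             else:
--                 result.append(word[j])
--                 j += 1
--         new_word_freqs[tuple(result)] = freq
--     return new_word_freqs
-- ===== Notes on version B (the rewrite author's own statement) =====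
-- stated objective: alternative
-- what changed: A's single fused scan per word is split into two differently-shaped passes: one pass records the greedy non-overlapping match positions, a second pass rebuilds the word by consulting that position set.
import Mathlib
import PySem

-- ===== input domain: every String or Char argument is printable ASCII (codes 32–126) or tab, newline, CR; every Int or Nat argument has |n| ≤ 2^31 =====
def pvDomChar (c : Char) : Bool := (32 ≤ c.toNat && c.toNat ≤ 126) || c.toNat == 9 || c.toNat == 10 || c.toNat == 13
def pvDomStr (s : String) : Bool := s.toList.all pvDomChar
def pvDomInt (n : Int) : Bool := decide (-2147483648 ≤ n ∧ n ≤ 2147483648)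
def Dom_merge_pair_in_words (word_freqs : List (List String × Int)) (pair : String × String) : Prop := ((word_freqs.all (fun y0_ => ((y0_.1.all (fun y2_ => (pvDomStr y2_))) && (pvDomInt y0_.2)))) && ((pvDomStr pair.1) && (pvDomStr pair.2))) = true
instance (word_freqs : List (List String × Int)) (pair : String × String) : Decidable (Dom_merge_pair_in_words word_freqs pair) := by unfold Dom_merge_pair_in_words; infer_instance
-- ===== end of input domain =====

-- B splits A's single fused scan per word into two passes (record the greedy
-- non-overlapping match positions, then rebuild from that position set);
-- same cost, alternative decomposition.

-- ===== PORT A =====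
-- A's while-loop over one word: fused match-and-emit scan from index i.
def pvAScan (word : List String) (p0 p1 merged : String) (i : Nat) : List String :=
  if _h : i < word.length then
    if i < word.length - 1 ∧ word.getD i "" = p0 ∧ word.getD (i + 1) "" = p1 then
      merged :: pvAScan word p0 p1 merged (i + 2)
    else
      word.getD i "" :: pvAScan word p0 p1 merged (i + 1)
  else []
termination_by word.length - i

def merge_pair_in_words (word_freqs : List (List String × Int)) (pair : String × String) : List (List String × Int) :=
  (word_freqs.foldl
    (fun (d : PySem.Dict (List String) Int) wf =>
      d.insert (pvAScan wf.1 pair.1 pair.2 (pair.1 ++ pair.2) 0) wf.2)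
    PySem.Dict.empty).items

-- ===== PORT B =====
-- pass 1: positions of the greedy non-overlapping matches
def pvBPos (word : List String) (p0 p1 : String) (i : Nat) : List Nat :=
  if _h : i < word.length - 1 then
    if word.getD i "" = p0 ∧ word.getD (i + 1) "" = p1 then
      i :: pvBPos word p0 p1 (i + 2)
    else
      pvBPos word p0 p1 (i + 1)
  else []
termination_by word.length - i

-- pass 2: rebuild the word, consulting the recorded position set
def pvBBuild (word : List String) (merged : String) (pos : PySem.Set Nat) (j : Nat) : List String :=
  if _h : j < word.length then
    if j ∈ pos then
      merged :: pvBBuild word merged pos (j + 2)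
    else
      word.getD j "" :: pvBBuild word merged pos (j + 1)
  else []
termination_by word.length - j

def pvBMerge (word : List String) (p0 p1 : String) : List String :=
  pvBBuild word (p0 ++ p1) (PySem.Set.ofList (pvBPos word p0 p1 0)) 0

def merge_pair_in_words_alt (word_freqs : List (List String × Int)) (pair : String × String) : List (List String × Int) :=
  (word_freqs.foldl
    (fun (d : PySem.Dict (List String) Int) wf =>
      d.insert (pvBMerge wf.1 pair.1 pair.2) wf.2)
    PySem.Dict.empty).items

-- ===== PRECONDITION & SPEC =====
def Spec_merge_pair_in_words (word_freqs : List (List String × Int)) (pair : String × String) (out : List (List String × Int)) : Prop := out = merge_pair_in_words_alt word_freqs pair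
instance (word_freqs : List (List String × Int)) (pair : String × String) (out : List (List String × Int)) : Decidable (Spec_merge_pair_in_words word_freqs pair out) := by unfold Spec_merge_pair_in_words; infer_instance

-- ===== CLAIM (what is proved, stated in full; the proofs are below) =====
def Claim_equal_merge_pair_in_words : Prop := ∀ (word_freqs : List (List String × Int)) (pair : String × String), Dom_merge_pair_in_words word_freqs pair → Spec_merge_pair_in_words word_freqs pair (merge_pair_in_words word_freqs pair)

-- ===== LEMMAS AND PROOFS =====

-- every recorded position lies at or after the scan start
theorem pvBPos_lower (word : List String) (p0 p1 : String) :
    ∀ n i, word.length - i ≤ n → ∀ x ∈ pvBPos word p0 p1 i, i ≤ x := by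
  intro n
  induction n with
  | zero =>
    intro i hn x hx
    rw [pvBPos, dif_neg (by omega)] at hx
    exact absurd hx (List.not_mem_nil)
  | succ n ih =>
    intro i hn x hx
    rw [pvBPos] at hx
    split at hx
    · next h =>
      split at hx
      · rcases List.mem_cons.mp hx with rfl | hx2
        · exact le_refl x
        · exact le_trans (by omega) (ih (i + 2) (by omega) x hx2)
      · exact le_trans (by omega) (ih (i + 1) (by omega) x hx)
    · exact absurd hx (List.not_mem_nil)

-- the rebuild pass over (pre ++ positions-from-i), with pre entirely below i,
-- reproduces A's fused scan from i
theorem pvBBuild_eq_pvAScan (word : List String) (p0 p1 merged : String) :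
    ∀ n i pre, word.length - i ≤ n → (∀ x ∈ pre, x < i) →
      pvBBuild word merged (PySem.Set.ofList (pre ++ pvBPos word p0 p1 i)) i
        = pvAScan word p0 p1 merged i := by
  intro n
  induction n with
  | zero =>
    intro i pre hn _
    rw [pvBBuild, dif_neg (by omega), pvAScan, dif_neg (by omega)]
  | succ n ih =>
    intro i pre hn hpre
    by_cases hlt : i < word.length
    · by_cases hm : i < word.length - 1 ∧ word.getD i "" = p0 ∧ word.getD (i + 1) "" = p1
      · -- match at i: pvBPos starts with i, both emit `merged`
        have hpos : pvBPos word p0 p1 i = i :: pvBPos word p0 p1 (i + 2) := by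
          rw [pvBPos, dif_pos hm.1, if_pos hm.2]
        have hmem : i ∈ PySem.Set.ofList (pre ++ pvBPos word p0 p1 i) := by
          rw [PySem.Set.mem_ofList, hpos]
          simp
        rw [pvBBuild, dif_pos hlt, if_pos hmem, pvAScan, dif_pos hlt, if_pos hm]
        congr 1
        have : pre ++ pvBPos word p0 p1 i = (pre ++ [i]) ++ pvBPos word p0 p1 (i + 2) := by
          rw [hpos]; simp
        rw [this]
        exact ih (i + 2) (pre ++ [i]) (by omega)
          (by intro x hx; rcases List.mem_append.mp hx with h1 | h1
              · exact lt_trans (hpre x h1) (by omega)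
              · simp at h1; omega)
      · -- no match at i: i is not a recorded position, both copy word[i]
        have hpos : pvBPos word p0 p1 i = pvBPos word p0 p1 (i + 1) := by
          by_cases h1 : i < word.length - 1
          · have h2 : ¬ (word.getD i "" = p0 ∧ word.getD (i + 1) "" = p1) := by tauto
            rw [pvBPos, dif_pos h1, if_neg h2]
          · rw [pvBPos, dif_neg h1]
            -- i ≥ len - 1 and i < len, so i = len - 1 and the scan from i+1 is also empty
            rw [pvBPos, dif_neg (by omega)]
        have hmem : i ∉ PySem.Set.ofList (pre ++ pvBPos word p0 p1 i) := by
          rw [PySem.Set.mem_ofList, hpos]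
          intro hcon
          rcases List.mem_append.mp hcon with h1 | h1
          · exact absurd (hpre i h1) (by omega)
          · have := pvBPos_lower word p0 p1 (word.length + 1) (i + 1) (by omega) i h1
            omega
        rw [pvBBuild, dif_pos hlt, if_neg hmem, pvAScan, dif_pos hlt, if_neg hm]
        congr 1
        rw [hpos]
        exact ih (i + 1) pre (by omega)
          (by intro x hx; exact lt_trans (hpre x hx) (by omega))
    · rw [pvBBuild, dif_neg hlt, pvAScan, dif_neg hlt]

-- per-word: B's two-pass rewrite equals A's fused scan
theorem pvBMerge_eq_pvAScan (word : List String) (p0 p1 : String) :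
    pvBMerge word p0 p1 = pvAScan word p0 p1 (p0 ++ p1) 0 := by
  unfold pvBMerge
  exact pvBBuild_eq_pvAScan word p0 p1 (p0 ++ p1) word.length 0 [] (by omega) (by simp)

-- ===== VERDICT (by name: the statement is the Claim_ definition above) =====
theorem merge_pair_in_words_spec : Claim_equal_merge_pair_in_words := by
  intro word_freqs pair _
  unfold Spec_merge_pair_in_words merge_pair_in_words merge_pair_in_words_alt
  have hf : ∀ w : List String,
      pvAScan w pair.1 pair.2 (pair.1 ++ pair.2) 0 = pvBMerge w pair.1 pair.2 :=
    fun w => (pvBMerge_eq_pvAScan w pair.1 pair.2).symm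
  simp only [hf]
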